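-- pv_equiv track=rewrite | github.com/FernandoIgorrr/prosite-signatures-patterns-generator-django | home/services.py | x_threshold_divider
-- ===== SOURCE A (Python) =====
-- def x_threshold_divider(
--
--     count_group_repeated_strings: list[tuple[str, int, tuple[int, int]]],
--     xthreshold: int = 20
-- ) -> list[list[tuple[str, int, tuple[int, int]]]]:
--
--     result = []  # Lista para armazenar os resultados
--     aux = []  # Lista auxiliar para agrupar strings
--
--     for group in count_group_repeated_strings:
--         # Verifica a condição para adicionar ao grupo auxiliar
--         if ((group[0] == 'x' or group[0] == 'x0') and group[1] < xthreshold) or (group[0] != 'x' and group[0] != 'x0'):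
--             aux.append(group)
--         elif aux:  # Se a lista auxiliar não estiver vazia
--             result.append(aux)
--             aux = []  # Limpa a lista auxiliar
--
--     if aux:  # Se ainda houver elementos na lista auxiliar, adicione ao resultado
--         result.append(aux)
--
--     return result
-- ===== SOURCE B (Python) =====
-- def x_threshold_divider(
--     count_group_repeated_strings: list[tuple[str, int, tuple[int, int]]],
--     xthreshold: int = 20
-- ) -> list[list[tuple[str, int, tuple[int, int]]]]:
--     lst = count_group_repeated_strings
--     # Stage 1: positions of the elements that end a group (the "cuts").
--     cuts = [i for i, g in enumerate(lst)
--             if not (((g[0] == 'x' or g[0] == 'x0') and g[1] < xthreshold)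
--                     or (g[0] != 'x' and g[0] != 'x0'))]
--     # Stage 2: slice the list between consecutive cut positions.
--     bounds = [-1] + cuts + [len(lst)]
--     return [lst[a + 1:b] for a, b in zip(bounds, bounds[1:]) if a + 1 < b]
-- ===== Notes on version B (the rewrite author's own statement) =====
-- stated objective: alternative
-- what changed: Instead of A's accumulator/flush loop, B first computes the index positions of all failing elements (the cuts) and then builds the result by slicing the input between consecutive cut positions, keeping only non-empty slices.
import Mathlib
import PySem

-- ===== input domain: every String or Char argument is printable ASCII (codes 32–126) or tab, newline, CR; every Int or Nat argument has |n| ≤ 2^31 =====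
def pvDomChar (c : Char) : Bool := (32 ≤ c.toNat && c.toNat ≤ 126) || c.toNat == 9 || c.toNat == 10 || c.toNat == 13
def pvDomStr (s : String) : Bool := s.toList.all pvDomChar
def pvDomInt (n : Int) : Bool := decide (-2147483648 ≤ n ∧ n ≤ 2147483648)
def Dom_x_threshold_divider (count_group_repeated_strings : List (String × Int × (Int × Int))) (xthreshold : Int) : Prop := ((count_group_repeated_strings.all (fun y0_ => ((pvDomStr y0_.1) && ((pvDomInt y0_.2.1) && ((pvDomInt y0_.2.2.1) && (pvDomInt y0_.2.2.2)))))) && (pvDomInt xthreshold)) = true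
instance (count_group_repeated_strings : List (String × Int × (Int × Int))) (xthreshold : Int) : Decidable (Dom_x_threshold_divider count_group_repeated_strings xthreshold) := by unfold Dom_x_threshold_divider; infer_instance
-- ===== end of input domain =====

-- B replaces A's accumulator/flush loop by a two-stage construction: collect the cut
-- indices (failing elements), then slice the input between consecutive cuts (alternative decomposition).


-- ===== PORT A =====
-- A's loop: fold over the list carrying (result, aux); append to aux when the
-- condition holds, otherwise flush a non-empty aux into result; final flush after the loop.
def x_threshold_divider (count_group_repeated_strings : List (String × Int × (Int × Int))) (xthreshold : Int) : List (List (String × Int × (Int × Int))) :=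
  let st := count_group_repeated_strings.foldl
    (fun (st : List (List (String × Int × (Int × Int))) × List (String × Int × (Int × Int))) group =>
      if ((group.1 == "x" || group.1 == "x0") && group.2.1 < xthreshold) || (group.1 != "x" && group.1 != "x0") then
        (st.1, st.2 ++ [group])
      else if st.2 ≠ [] then (st.1 ++ [st.2], [])
      else st)
    ([], [])
  if st.2 ≠ [] then st.1 ++ [st.2] else st.1

-- ===== PORT B =====
-- B's keep-condition (the body of the 'if not (…)' in the cuts comprehension)
def pvKeep (xthreshold : Int) (group : String × Int × (Int × Int)) : Bool :=
  ((group.1 == "x" || group.1 == "x0") && group.2.1 < xthreshold) || (group.1 != "x" && group.1 != "x0")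

-- B: cuts = [i for i, g in enumerate(lst) if not keep(g)];
--    bounds = [-1] + cuts + [len(lst)];
--    [lst[a+1:b] for a, b in zip(bounds, bounds[1:]) if a+1 < b]
def x_threshold_divider_alt (count_group_repeated_strings : List (String × Int × (Int × Int))) (xthreshold : Int) : List (List (String × Int × (Int × Int))) :=
  let lst := count_group_repeated_strings
  let cuts : List Int := ((PySem.List.enumerate lst 0).filter (fun q => !(pvKeep xthreshold q.2))).map (·.1)
  let bounds : List Int := [-1] ++ cuts ++ [(lst.length : Int)]
  ((bounds.zip bounds.tail).filter (fun q => decide (q.1 + 1 < q.2))).map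
    (fun q => PySem.List.slice lst (some (q.1 + 1)) (some q.2))

-- ===== PRECONDITION & SPEC =====
def Spec_x_threshold_divider (count_group_repeated_strings : List (String × Int × (Int × Int))) (xthreshold : Int) (out : List (List (String × Int × (Int × Int)))) : Prop := out = x_threshold_divider_alt count_group_repeated_strings xthreshold
instance (count_group_repeated_strings : List (String × Int × (Int × Int))) (xthreshold : Int) (out : List (List (String × Int × (Int × Int)))) : Decidable (Spec_x_threshold_divider count_group_repeated_strings xthreshold out) := by unfold Spec_x_threshold_divider; infer_instance

-- ===== CLAIM (what is proved, stated in full; the proofs are below) =====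
def Claim_equal_x_threshold_divider : Prop := ∀ (count_group_repeated_strings : List (String × Int × (Int × Int))) (xthreshold : Int), Dom_x_threshold_divider count_group_repeated_strings xthreshold → Spec_x_threshold_divider count_group_repeated_strings xthreshold (x_threshold_divider count_group_repeated_strings xthreshold)

-- ===== LEMMAS AND PROOFS =====


-- maximal kept runs: the common description both ports are reduced to
def pvRuns (xthreshold : Int) : List (String × Int × (Int × Int)) → List (List (String × Int × (Int × Int)))
  | [] => []
  | g :: rest =>
    if pvKeep xthreshold g then
      (g :: rest.takeWhile (pvKeep xthreshold)) :: pvRuns xthreshold (rest.dropWhile (pvKeep xthreshold))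
    else pvRuns xthreshold rest
termination_by l => l.length
decreasing_by
  · exact Nat.lt_succ_of_le (List.length_dropWhile_le _ _)
  · simp

-- ---- A = pvRuns ----

-- recursive description of A's fold-then-flush, with the pending aux made explicit
def pvGlue (xthreshold : Int) (aux : List (String × Int × (Int × Int))) :
    List (String × Int × (Int × Int)) → List (List (String × Int × (Int × Int)))
  | [] => if aux ≠ [] then [aux] else []
  | g :: rest =>
    if pvKeep xthreshold g then pvGlue xthreshold (aux ++ [g]) rest
    else if aux ≠ [] then aux :: pvGlue xthreshold [] rest
    else pvGlue xthreshold [] rest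

lemma pvGlue_eq_runs (xthreshold : Int) (l aux : List (String × Int × (Int × Int))) :
    pvGlue xthreshold aux l =
      if aux = [] then pvRuns xthreshold l
      else (aux ++ l.takeWhile (pvKeep xthreshold)) :: pvRuns xthreshold (l.dropWhile (pvKeep xthreshold)) := by
  induction l generalizing aux with
  | nil =>
    by_cases h : aux = [] <;> simp [pvGlue, pvRuns, h]
  | cons g rest ih =>
    by_cases hk : pvKeep xthreshold g
    · rw [pvGlue, if_pos hk, ih]
      simp [hk]
      by_cases h : aux = [] <;> simp [h, pvRuns, hk]
    · rw [pvGlue, if_neg hk]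
      by_cases h : aux = []
      · simp [h, ih, pvRuns, hk]
      · simp [h, ih, hk, pvRuns]

lemma pvFold_flush (xthreshold : Int) (l : List (String × Int × (Int × Int)))
    (res : List (List (String × Int × (Int × Int)))) (aux : List (String × Int × (Int × Int))) :
    (let st := l.foldl
      (fun (st : List (List (String × Int × (Int × Int))) × List (String × Int × (Int × Int))) group =>
        if pvKeep xthreshold group then
          (st.1, st.2 ++ [group])
        else if st.2 ≠ [] then (st.1 ++ [st.2], [])
        else st)
      (res, aux)
     if st.2 ≠ [] then st.1 ++ [st.2] else st.1) = res ++ pvGlue xthreshold aux l := by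
  induction l generalizing res aux with
  | nil =>
    simp only [List.foldl_nil, pvGlue]
    by_cases h : aux = [] <;> simp [h]
  | cons g rest ih =>
    simp only [List.foldl_cons]
    by_cases hk : pvKeep xthreshold g
    · rw [if_pos hk]
      refine (ih res (aux ++ [g])).trans ?_
      rw [pvGlue, if_pos hk]
    · rw [if_neg hk]
      by_cases h : aux = []
      · have e : (if aux ≠ [] then (res ++ [aux], ([] : List (String × Int × (Int × Int)))) else (res, aux)) = (res, aux) := by simp [h]
        rw [e]
        refine (ih res aux).trans ?_
        subst h
        rw [pvGlue, if_neg hk]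
        simp
      · have e : (if aux ≠ [] then (res ++ [aux], ([] : List (String × Int × (Int × Int)))) else (res, aux)) = (res ++ [aux], []) := by simp [h]
        rw [e]
        refine (ih (res ++ [aux]) []).trans ?_
        rw [pvGlue, if_neg hk]
        simp [h]

lemma pvA_eq_runs (l : List (String × Int × (Int × Int))) (t : Int) :
    x_threshold_divider l t = pvRuns t l := by
  have h : x_threshold_divider l t = [] ++ pvGlue t [] l := pvFold_flush t l [] []
  rw [h, pvGlue_eq_runs]
  simp

-- ---- B = pvRuns: cut indices, pair slicing ----

def cutsN (t : Int) : List (String × Int × (Int × Int)) → List Nat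
  | [] => []
  | g :: rest => if pvKeep t g then (cutsN t rest).map (· + 1) else 0 :: (cutsN t rest).map (· + 1)
lemma cuts_enum (t : Int) (l : List (String × Int × (Int × Int))) (s : Int) :
    ((PySem.List.enumerate l s).filter (fun q => !(pvKeep t q.2))).map (·.1)
      = (cutsN t l).map (fun k => s + (k : Nat)) := by
  induction l generalizing s with
  | nil => simp [PySem.List.enumerate_nil, cutsN]
  | cons g rest ih =>
    rw [PySem.List.enumerate_cons]
    cases hk : pvKeep t g <;>
      simp only [cutsN, hk, List.filter_cons, Bool.not_false, Bool.not_true, Bool.false_eq_true,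
        if_false, if_true, List.map_cons, List.map_map, ih (s + 1)]
    · simp only [Nat.cast_zero, add_zero, Function.comp_def]
      exact congrArg _ (List.map_congr_left fun a _ => by push_cast; ring)
    · simp only [Function.comp_def]
      exact List.map_congr_left fun a _ => by push_cast; ring

def pairSegs (l : List (String × Int × (Int × Int))) (prs : List (Nat × Nat)) :
    List (List (String × Int × (Int × Int))) :=
  (prs.filter (fun q => decide (q.1 < q.2))).map (fun q => (l.drop q.1).take (q.2 - q.1))

lemma seg_shift (k l : List (String × Int × (Int × Int))) (S T : List Nat) :
    pairSegs (k ++ l) ((S.map (· + k.length)).zip (T.map (· + k.length)))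
      = pairSegs l (S.zip T) := by
  unfold pairSegs
  rw [List.zip_map, List.filter_map, List.map_map]
  have hf : ((fun q : Nat × Nat => decide (q.1 < q.2)) ∘ Prod.map (· + k.length) (· + k.length))
      = (fun q : Nat × Nat => decide (q.1 < q.2)) := by
    funext q; simp [Prod.map]
  rw [hf]
  refine List.map_congr_left fun q _ => ?_
  simp only [Function.comp_def, Prod.map]
  have hd : (k ++ l).drop (q.1 + k.length) = l.drop q.1 := by
    rw [Nat.add_comm, List.drop_append]
    simp [List.drop_eq_nil_of_le (by omega : k.length ≤ k.length + q.1)]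
  rw [hd]
  congr 1
  omega

def segsN (t : Int) (l : List (String × Int × (Int × Int))) : List (List (String × Int × (Int × Int))) :=
  pairSegs l ((0 :: (cutsN t l).map (· + 1)).zip (cutsN t l ++ [l.length]))

lemma pairSegs_cons_pos (l : List (String × Int × (Int × Int))) (a b : Nat) (prs : List (Nat × Nat)) (h : a < b) :
    pairSegs l ((a, b) :: prs) = ((l.drop a).take (b - a)) :: pairSegs l prs := by
  simp [pairSegs, h]

lemma pairSegs_cons_neg (l : List (String × Int × (Int × Int))) (a b : Nat) (prs : List (Nat × Nat)) (h : ¬ a < b) :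
    pairSegs l ((a, b) :: prs) = pairSegs l prs := by
  simp [pairSegs, h]

lemma cutsN_append_kept (t : Int) (k d : List (String × Int × (Int × Int)))
    (hk : ∀ x ∈ k, pvKeep t x = true) :
    cutsN t (k ++ d) = (cutsN t d).map (· + k.length) := by
  induction k with
  | nil => simp
  | cons a k ih =>
    have ha : pvKeep t a = true := hk a (by simp)
    rw [List.cons_append, cutsN, if_pos ha, ih (fun x hx => hk x (by simp [hx]))]
    rw [List.map_map]
    refine List.map_congr_left fun x _ => ?_
    simp [Function.comp]
    omega

lemma segsN_eq_runs (t : Int) (l : List (String × Int × (Int × Int))) : segsN t l = pvRuns t l := by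
  induction hn : l.length using Nat.strong_induction_on generalizing l with
  | _ n ih =>
  cases l with
  | nil => simp [segsN, cutsN, pairSegs, pvRuns]
  | cons g rest =>
    cases hk : pvKeep t g
    · -- head fails: first pair is (0,0), rest shifts by 1
      rw [pvRuns, if_neg (by simp [hk])]
      have hcuts : cutsN t (g :: rest) = 0 :: (cutsN t rest).map (· + 1) := by
        rw [cutsN, if_neg (by simp [hk])]
      have hseg : segsN t (g :: rest) = segsN t rest := by
        rw [segsN, hcuts]
        rw [show (0 :: (0 :: (cutsN t rest).map (· + 1)).map (· + 1)).zip
              ((0 :: (cutsN t rest).map (· + 1)) ++ [(g :: rest).length])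
            = (0, 0) :: (((0 :: (cutsN t rest).map (· + 1)).map (· + 1)).zip
              (((cutsN t rest) ++ [rest.length]).map (· + 1))) from ?_]
        · rw [pairSegs_cons_neg _ _ _ _ (by omega)]
          rw [show (g :: rest : List _) = [g] ++ rest from rfl]
          rw [show ((0 :: (cutsN t rest).map (· + 1)).map (· + 1)).zip
                (((cutsN t rest) ++ [rest.length]).map (· + 1))
              = ((0 :: (cutsN t rest).map (· + 1)).map (· + ([g] : List (String × Int × (Int × Int))).length)).zip
                (((cutsN t rest) ++ [rest.length]).map (· + ([g] : List (String × Int × (Int × Int))).length)) from by norm_num]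
          rw [seg_shift]
          rfl
        · simp [List.map_map]
      rw [hseg]
      exact ih rest.length (by simp [← hn]) rest rfl
    · -- head kept: peel the maximal kept prefix k, recurse on d
      rw [pvRuns, if_pos hk]
      set k : List (String × Int × (Int × Int)) := g :: rest.takeWhile (pvKeep t) with hkdef
      set d : List (String × Int × (Int × Int)) := rest.dropWhile (pvKeep t) with hddef
      have hsplit : g :: rest = k ++ d := by
        simp [hkdef, hddef, List.takeWhile_append_dropWhile]
      have hkall : ∀ x ∈ k, pvKeep t x = true := by
        intro x hx
        rcases List.mem_cons.mp hx with h | h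
        · exact h ▸ hk
        · exact List.mem_takeWhile_imp h
      have hm : 1 ≤ k.length := by simp [hkdef]
      have hcuts : cutsN t (g :: rest) = (cutsN t d).map (· + k.length) := by
        rw [hsplit]; exact cutsN_append_kept t k d hkall
      have hlen : (g :: rest).length = k.length + d.length := by
        rw [hsplit]; simp
      cases hd : d with
      | nil =>
        rw [segsN, hcuts, hd]
        simp only [cutsN, List.map_nil, List.nil_append]
        rw [show ([0].zip [(g :: rest).length]) = [(0, (g :: rest).length)] from rfl,
          pairSegs_cons_pos _ _ _ _ (by simp)]
        simp [pairSegs, pvRuns]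
        rw [hsplit, hd]
        simp
      | cons b d' =>
        have hb : pvKeep t b = false := by
          have key : ∀ r : List (String × Int × (Int × Int)),
              r.dropWhile (pvKeep t) = b :: d' → pvKeep t b = false := by
            intro r
            induction r with
            | nil => intro h; simp at h
            | cons a r ihr =>
              intro h
              rw [List.dropWhile_cons] at h
              by_cases ha : pvKeep t a
              · exact ihr (by simpa [ha] using h)
              · simp only [ha] at h
                cases h
                simpa using ha
          exact key rest (hddef ▸ hd)
        have hD : cutsN t d = 0 :: (cutsN t d').map (· + 1) := by
          rw [hd, cutsN, if_neg (by simp [hb])]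
        set E : List Nat := (cutsN t d').map (· + 1) with hE
        rw [segsN, hcuts, hD]
        rw [show (g :: rest).length = d.length + k.length from by omega]
        rw [hsplit]
        have h1 : (0 :: List.map (fun x => x + 1) (List.map (fun x => x + k.length) (0 :: E)))
            = 0 :: (((0 :: E).map (fun x => x + 1)).map (fun x => x + k.length)) := by
          refine congrArg (0 :: ·) ?_
          rw [List.map_map, List.map_map]
          refine List.map_congr_left fun x _ => ?_
          simp only [Function.comp_def]
          omega
        have h2 : (List.map (fun x => x + k.length) (0 :: E) ++ [d.length + k.length])
            = (0 :: (E ++ [d.length])).map (fun x => x + k.length) := by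
          simp
        rw [h1, h2]
        have h3 : List.map (fun x => x + k.length) (0 :: (E ++ [d.length]))
            = (0 + k.length) :: List.map (fun x => x + k.length) (E ++ [d.length]) := rfl
        rw [h3, List.zip_cons_cons]
        rw [pairSegs_cons_pos _ _ _ _ (by omega : 0 < 0 + k.length)]
        rw [seg_shift]
        have htake : ((k ++ d).drop 0).take (0 + k.length - 0) = k := by
          simp
        rw [htake]
        have hsegd : segsN t d = pairSegs d ((List.map (fun x => x + 1) (0 :: E)).zip (E ++ [d.length])) := by
          rw [segsN, hD]
          rw [show ((0 :: (0 :: E).map (fun x => x + 1)).zip ((0 :: E) ++ [d.length]))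
              = (0, 0) :: ((List.map (fun x => x + 1) (0 :: E)).zip (E ++ [d.length])) from by simp]
          rw [pairSegs_cons_neg _ _ _ _ (by omega)]
        rw [← hsegd, ← hd]
        exact congrArg (k :: ·) (ih d.length (by omega) d rfl)

lemma pvB_eq_segsN (l : List (String × Int × (Int × Int))) (t : Int) :
    x_threshold_divider_alt l t = segsN t l := by
  have hcuts := cuts_enum t l 0
  simp only [x_threshold_divider_alt, hcuts]
  simp only [zero_add]
  set C := cutsN t l with hC
  have htail : (([-1] ++ List.map (fun k => ((k : Nat) : Int)) C ++ [(l.length : Int)]).tail)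
      = List.map (fun k => ((k : Nat) : Int)) C ++ [(l.length : Int)] := rfl
  rw [htail]
  have hassoc : ([-1] ++ List.map (fun k => ((k : Nat) : Int)) C ++ [(l.length : Int)])
      = ((-1 :: List.map (fun k => ((k : Nat) : Int)) C) ++ [(l.length : Int)]) := rfl
  rw [hassoc]
  have hright : (List.map (fun k => ((k : Nat) : Int)) C ++ [(l.length : Int)])
      = (List.map (fun k => ((k : Nat) : Int)) C ++ [(l.length : Int)]) ++ ([] : List Int) := by simp
  rw [hright, List.zip_append (by simp)]
  simp only [List.zip_nil_right, List.append_nil]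
  have hS : (-1 :: List.map (fun k => ((k : Nat) : Int)) C)
      = (0 :: C.map (· + 1)).map (fun (s : Nat) => (s : Int) - 1) := by
    simp only [List.map_cons, List.map_map, Nat.cast_zero, zero_sub]
    refine congrArg _ (List.map_congr_left fun x _ => ?_)
    simp only [Function.comp_def]
    omega
  have hT : (List.map (fun k => ((k : Nat) : Int)) C ++ [(l.length : Int)])
      = (C ++ [l.length]).map (fun e => ((e : Nat) : Int)) := by simp
  rw [hS, hT, List.zip_map, List.filter_map, List.map_map]
  have hf : ((fun q : Int × Int => decide (q.1 + 1 < q.2)) ∘ Prod.map (fun s : Nat => (s : Int) - 1) (fun e : Nat => ((e : Nat) : Int)))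
      = fun q : Nat × Nat => decide (q.1 < q.2) := by
    funext q
    rcases q with ⟨a, b⟩
    simp only [Function.comp_def, Prod.map, decide_eq_decide]
    omega
  rw [hf]
  unfold segsN pairSegs
  rw [← hC]
  refine List.map_congr_left fun q hq => ?_
  simp only [Function.comp_def, Prod.map]
  have h4 : ((q.1 : Int) - 1 + 1) = (q.1 : Int) := by ring
  rw [h4, PySem.List.slice_natCast]

lemma pvB_eq_runs (l : List (String × Int × (Int × Int))) (t : Int) :
    x_threshold_divider_alt l t = pvRuns t l := by
  rw [pvB_eq_segsN, segsN_eq_runs]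

-- ===== VERDICT (by name: the statement is the Claim_ definition above) =====
theorem x_threshold_divider_spec : Claim_equal_x_threshold_divider := by
  intro l t _
  show x_threshold_divider l t = x_threshold_divider_alt l t
  rw [pvA_eq_runs, pvB_eq_runs]
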